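-- pv_equiv track=rewrite | github.com/josemmo/Clostridium | test.py | create_speactr
-- ===== SOURCE A (Python) =====
-- def create_speactr(mz, intens):
--     spec = []
--     for i in range(200, 1750):
--         if i in mz:
--             spec.append(intens[mz.index(i)])
--         else:
--             spec.append(0)
--     return spec
-- ===== SOURCE B (Python) =====
-- def create_speactr(mz, intens):
--     spec = [0] * 1550
--     seen = set()
--     for j, v in enumerate(mz):
--         if 200 <= v < 1750 and v not in seen:
--             seen.add(v)
--             spec[v - 200] = intens[j]
--     return spec
-- ===== Notes on version B (the rewrite author's own statement) =====
-- stated objective: faster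
-- what changed: B replaces A's gather (scan mz twice for each of the 1550 grid slots via 'in' and '.index') with a single scatter pass over the points: a preallocated [0]*1550 grid plus a seen-set so the first occurrence of each in-range m/z wins.
import Mathlib
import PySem

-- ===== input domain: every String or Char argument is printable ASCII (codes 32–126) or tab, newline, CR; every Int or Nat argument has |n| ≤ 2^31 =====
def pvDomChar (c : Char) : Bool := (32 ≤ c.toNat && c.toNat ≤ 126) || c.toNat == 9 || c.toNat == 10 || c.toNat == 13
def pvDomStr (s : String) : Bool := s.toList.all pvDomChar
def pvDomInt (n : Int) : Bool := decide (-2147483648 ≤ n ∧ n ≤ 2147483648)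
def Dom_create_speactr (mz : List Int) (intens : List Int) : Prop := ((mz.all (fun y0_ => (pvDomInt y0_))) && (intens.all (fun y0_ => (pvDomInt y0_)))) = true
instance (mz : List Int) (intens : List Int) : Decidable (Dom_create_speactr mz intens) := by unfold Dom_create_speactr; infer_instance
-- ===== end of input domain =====

-- B scatters the input points into a preallocated 1550-slot grid in one pass (first
-- occurrence wins via a seen-set) instead of scanning mz for every grid slot: faster.

-- ===== PORT A =====
def create_speactr (mz : List Int) (intens : List Int) : List Int :=
  (PySem.List.pyRange 200 1750).foldl (fun spec i =>
    if mz.contains i then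
      spec ++ [match PySem.List.index? mz i with
               | some j => PySem.List.pyGetD intens (j : Int) 0
               | none => 0]
    else
      spec ++ [0]) []

-- ===== PORT B =====
-- loop body of Source B: scatter one enumerated point (j, v) into (spec, seen)
def pvBStep (intens : List Int) (st : List Int × PySem.Set Int) (p : Int × Int) :
    List Int × PySem.Set Int :=
  if 200 ≤ p.2 ∧ p.2 < 1750 ∧ p.2 ∉ st.2 then
    (PySem.List.pySetD st.1 (p.2 - 200) (PySem.List.pyGetD intens p.1 0), st.2.add p.2)
  else st

def create_speactr_alt (mz : List Int) (intens : List Int) : List Int :=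
  ((PySem.List.enumerate mz).foldl (pvBStep intens) (List.replicate 1550 0, PySem.Set.empty)).1

-- ===== PRECONDITION & SPEC =====
-- Pre_ excludes exactly the inputs where Python A raises IndexError: a first occurrence
-- of an in-range m/z value at a position not covered by intens.
def Pre_create_speactr (mz : List Int) (intens : List Int) : Prop :=
  ∀ (j : Nat) (h : j < mz.length),
    200 ≤ mz[j] → mz[j] < 1750 → mz[j] ∉ mz.take j → j < intens.length
instance (mz : List Int) (intens : List Int) : Decidable (Pre_create_speactr mz intens) := by
  unfold Pre_create_speactr; infer_instance
def pvWitness_create_speactr : List Int × List Int := ([500, 300, 500], [7, 8, 9])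

def Spec_create_speactr (mz : List Int) (intens : List Int) (out : List Int) : Prop := out = create_speactr_alt mz intens
instance (mz : List Int) (intens : List Int) (out : List Int) : Decidable (Spec_create_speactr mz intens out) := by unfold Spec_create_speactr; infer_instance

-- ===== CLAIM (what is proved, stated in full; the proofs are below) =====
def Claim_equal_create_speactr : Prop := ∀ (mz : List Int) (intens : List Int), Dom_create_speactr mz intens → Pre_create_speactr mz intens → Spec_create_speactr mz intens (create_speactr mz intens)

-- ===== LEMMAS AND PROOFS =====

-- the per-slot value A gathers for grid point i
def pvGather (mz : List Int) (intens : List Int) (i : Int) : Int :=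
  if mz.contains i then
    match PySem.List.index? mz i with
    | some j => PySem.List.pyGetD intens (j : Int) 0
    | none => 0
  else 0

theorem create_speactr_eq_map (mz intens : List Int) :
    create_speactr mz intens = (PySem.List.pyRange 200 1750).map (pvGather mz intens) := by
  unfold create_speactr
  have h : (fun (spec : List Int) (i : Int) =>
      if mz.contains i then
        spec ++ [match PySem.List.index? mz i with
                 | some j => PySem.List.pyGetD intens (j : Int) 0
                 | none => 0]
      else spec ++ [0]) = fun spec i => spec ++ [pvGather mz intens i] := by
    funext spec i
    unfold pvGather
    by_cases hc : i ∈ mz <;> simp [hc]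
  rw [h, PySem.List.foldl_append_singleton_eq_map]
  simp

theorem pvBStep_length (intens : List Int) (st : List Int × PySem.Set Int) (p : Int × Int) :
    (pvBStep intens st p).1.length = st.1.length := by
  unfold pvBStep; split
  · exact PySem.List.length_pySetD _ _ _
  · rfl

theorem pvScatter_length (intens : List Int) (mz : List Int) (s : Int)
    (spec : List Int) (seen : PySem.Set Int) :
    ((PySem.List.enumerate mz s).foldl (pvBStep intens) (spec, seen)).1.length = spec.length := by
  induction mz generalizing s spec seen with
  | nil => simp [PySem.List.enumerate_nil]
  | cons x xs ih =>
    rw [PySem.List.enumerate_cons]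
    simp only [List.foldl_cons]
    rcases hst : pvBStep intens (spec, seen) (s, x) with ⟨sp', se'⟩
    rw [ih (s + 1) sp' se']
    have := pvBStep_length intens (spec, seen) (s, x)
    rw [hst] at this
    exact this

set_option maxRecDepth 8000 in
theorem pvScatter_get (intens : List Int) (mz : List Int) (s : Int)
    (spec : List Int) (seen : PySem.Set Int) (hlen : spec.length = 1550)
    (k : Nat) (hk : k < 1550) :
    PySem.List.pyGetD ((PySem.List.enumerate mz s).foldl (pvBStep intens) (spec, seen)).1 (k : Int) 0 =
      if (200 + (k : Int)) ∈ seen then PySem.List.pyGetD spec (k : Int) 0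
      else
        match PySem.List.index? mz (200 + (k : Int)) with
        | some j => PySem.List.pyGetD intens (s + (j : Int)) 0
        | none => PySem.List.pyGetD spec (k : Int) 0 := by
  induction mz generalizing s spec seen with
  | nil =>
    simp [PySem.List.enumerate_nil, PySem.List.index?_eq_idxOf?]
  | cons x xs ih =>
    rw [PySem.List.enumerate_cons]
    simp only [List.foldl_cons]
    by_cases hx : x = 200 + (k : Int)
    · subst hx
      by_cases hseen : (200 + (k : Int)) ∈ seen
      · -- skipped: already seen
        have : pvBStep intens (spec, seen) (s, 200 + (k : Int)) = (spec, seen) := by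
          unfold pvBStep; simp [hseen]
        rw [this, ih (s + 1) spec seen hlen]
        simp [hseen]
      · -- first occurrence: written now, fixed thereafter
        have hstep : pvBStep intens (spec, seen) (s, 200 + (k : Int)) =
            (PySem.List.pySetD spec (200 + (k : Int) - 200) (PySem.List.pyGetD intens s 0),
             seen.add (200 + (k : Int))) := by
          unfold pvBStep; simp [hseen]; omega
        rw [hstep, ih (s + 1) _ _ (by rw [PySem.List.length_pySetD]; exact hlen)]
        have hmem : (200 + (k : Int)) ∈ seen.add (200 + (k : Int)) := by
          rw [PySem.Set.mem_add]; right; rfl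
        rw [show (200:Int) + (k:Int) - 200 = ((k:Nat):Int) from by omega]
        have hset := PySem.List.pyGetD_pySetD_natCast spec k k (PySem.List.pyGetD intens s 0) 0
          (by omega)
        rw [if_pos hmem, if_neg hseen, hset, if_pos rfl, PySem.List.index?_cons_self]
        simp
    · -- head is a different value: slot k untouched by this step
      have hget : ∀ st : List Int × PySem.Set Int, st.1.length = 1550 →
          PySem.List.pyGetD (pvBStep intens st (s, x)).1 (k : Int) 0 =
            PySem.List.pyGetD st.1 (k : Int) 0 := by
        intro st hst
        unfold pvBStep
        split
        · rename_i hcond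
          have hx200 : x - 200 = (((x - 200).toNat : Nat) : Int) := by
            simp only [Int.toNat_of_nonneg (by omega : (0:Int) ≤ x - 200)]
          rw [hx200]
          have := PySem.List.pyGetD_pySetD_natCast st.1 (x - 200).toNat k
            (PySem.List.pyGetD intens s 0) 0 (by omega)
          rw [this]
          have : ¬ (k = (x - 200).toNat) := by omega
          simp [this]
        · rfl
      have hmemadd : ∀ (y : Int), (200 + (k : Int)) ∈ seen.add y ↔ (200 + (k : Int)) ∈ seen ∨ 200 + (k : Int) = y :=
        fun y => PySem.Set.mem_add seen y _
      have hidxcons : PySem.List.index? (x :: xs) (200 + (k : Int)) =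
          (PySem.List.index? xs (200 + (k : Int))).map (· + 1) :=
        PySem.List.index?_cons_of_ne xs hx
      -- the new seen set agrees with seen on membership of 200+k
      by_cases hcond : 200 ≤ x ∧ x < 1750 ∧ x ∉ seen
      · have hstep : pvBStep intens (spec, seen) (s, x) =
            (PySem.List.pySetD spec (x - 200) (PySem.List.pyGetD intens s 0), seen.add x) := by
          unfold pvBStep; simp [hcond]
        rw [hstep, ih (s + 1) _ _ (by rw [PySem.List.length_pySetD]; exact hlen)]
        have hmem' : ((200 + (k : Int)) ∈ seen.add x) ↔ ((200 + (k : Int)) ∈ seen) := by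
          rw [hmemadd x]
          exact ⟨fun h => h.resolve_right (fun e => hx e.symm), Or.inl⟩
        have hsetget : PySem.List.pyGetD (PySem.List.pySetD spec (x - 200) (PySem.List.pyGetD intens s 0)) (k : Int) 0 = PySem.List.pyGetD spec (k : Int) 0 := by
          have hx200 : x - 200 = (((x - 200).toNat : Nat) : Int) := by
            simp only [Int.toNat_of_nonneg (by omega : (0:Int) ≤ x - 200)]
          rw [hx200]
          rw [PySem.List.pyGetD_pySetD_natCast spec (x - 200).toNat k
            (PySem.List.pyGetD intens s 0) 0 (by omega)]
          have : ¬ (k = (x - 200).toNat) := by omega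
          simp [this]
        rw [hidxcons]
        by_cases hseen : (200 + (k : Int)) ∈ seen
        · simp [hmem'.mpr hseen, hseen, hsetget]
        · have : ¬ ((200 + (k : Int)) ∈ seen.add x) := fun h => hseen (hmem'.mp h)
          simp only [this, hseen]
          cases PySem.List.index? xs (200 + (k : Int)) with
          | none => simp [hsetget]
          | some j => simp; ring_nf
      · have hstep : pvBStep intens (spec, seen) (s, x) = (spec, seen) := by
          unfold pvBStep; simp only [if_neg hcond]
        rw [hstep, ih (s + 1) spec seen hlen, hidxcons]
        by_cases hseen : (200 + (k : Int)) ∈ seen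
        · simp [hseen]
        · simp only [hseen]
          cases PySem.List.index? xs (200 + (k : Int)) with
          | none => simp
          | some j => simp; ring_nf

-- ===== VERDICT (by name: the statement is the Claim_ definition above) =====
set_option maxRecDepth 8000 in
theorem create_speactr_spec : Claim_equal_create_speactr := by
  intro mz intens _ _
  unfold Spec_create_speactr
  rw [create_speactr_eq_map]
  have hlenB : (create_speactr_alt mz intens).length = 1550 := by
    unfold create_speactr_alt
    rw [pvScatter_length]
    simp
  apply List.ext_getElem
  · simpa [PySem.List.length_pyRange_one] using hlenB.symm
  · intro k hk1 hk2
    have hk : k < 1550 := by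
      simpa [PySem.List.length_pyRange_one] using hk1
    have hA : ((PySem.List.pyRange 200 1750).map (pvGather mz intens))[k]'hk1 =
        pvGather mz intens (200 + (k : Int)) := by
      rw [List.getElem_map, PySem.List.getElem_pyRange_one]
    rw [hA]
    have hB := pvScatter_get intens mz 0 (List.replicate 1550 0) PySem.Set.empty
      (by simp) k hk
    have hBget : PySem.List.pyGetD (create_speactr_alt mz intens) (k : Int) 0 =
        (create_speactr_alt mz intens)[k]'hk2 := by
      rw [PySem.List.pyGetD_natCast]
      exact List.getD_eq_getElem _ _ (by omega)
    rw [← hBget]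
    unfold create_speactr_alt
    rw [hB]
    have hempty : ¬ ((200 + (k : Int)) ∈ (PySem.Set.empty : PySem.Set Int)) := by
      simp [PySem.Set.empty]
    rw [if_neg hempty]
    have hrep : PySem.List.pyGetD (List.replicate 1550 (0 : Int)) ((k : Nat) : Int) 0 = 0 := by
      rw [PySem.List.pyGetD_natCast]
      simp only [List.getD_eq_getElem?_getD, List.getElem?_replicate]
      simp [hk]
    cases hidx : PySem.List.index? mz (200 + (k : Int)) with
    | none =>
      have hnm : (200 + (k : Int)) ∉ mz := (PySem.List.index?_eq_none_iff mz _).mp hidx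
      show pvGather mz intens (200 + (k : Int)) = PySem.List.pyGetD (List.replicate 1550 (0 : Int)) ((k : Nat) : Int) 0
      rw [hrep]
      unfold pvGather
      simp [hnm]
    | some j =>
      have hmem : (200 + (k : Int)) ∈ mz := by
        have h2 := PySem.List.index?_isSome_iff (xs := mz) (v := 200 + (k : Int))
        exact h2.mp (by rw [hidx]; rfl)
      show pvGather mz intens (200 + (k : Int)) = PySem.List.pyGetD intens (0 + (j : Int)) 0
      unfold pvGather
      rw [PySem.List.index?_eq_idxOf?] at hidx
      simp [hmem, hidx]
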